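-- pv_equiv track=rewrite | github.com/thenameisjuh/eurico-thomaz-lima-dashboard | app.py | destacar_entidades
-- ===== SOURCE A (Python) =====
-- cores_map = {
--     "compositor": "#FFD700",    # Dourado
--     "navio": "#1E90FF",         # Azul Marinho
--     "gravadora": "#BA55D3",     # Orquídea
--     "escola": "#32CD32",        # Verde Lima
--     "cidade": "#FF4500",        # Laranja avermelhado
--     "pais": "#20B2AA",          # Verde Marinho
--     "cantora": "#FF69B4",       # Rosa Choque
--     "destinatario": "#FF4B4B",  # Vermelho Bosch
--     "default": "#999999"        # Cinza
-- }
--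
-- def destacar_entidades(texto):
--     """Substitui termos chave por versões coloridas em HTML."""
--     substituicoes = {
--         "Eurico": cores_map["destinatario"],
--         "Rio de Janeiro": cores_map["cidade"],
--         "Brasil": cores_map["pais"],
--         "Marialma": cores_map["cantora"],
--         "Odeon": cores_map["gravadora"]
--     }
--     for termo, cor in substituicoes.items():
--         html_span = f'<span style="background-color: {cor}44; border-bottom: 2px solid {cor}; padding: 0 2px;">{termo}</span>'
--         texto = texto.replace(termo, html_span)
--     return texto
-- ===== SOURCE B (Python) =====
-- # Single left-to-right scan replacing the five keywords in one pass (first match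
-- # in table order), instead of five sequential full-text .replace passes.
-- def destacar_entidades(texto):
--     """Substitui termos chave por versões coloridas em HTML."""
--     subs = []
--     for termo, cor in (("Eurico", "#FF4B4B"), ("Rio de Janeiro", "#FF4500"),
--                        ("Brasil", "#20B2AA"), ("Marialma", "#FF69B4"),
--                        ("Odeon", "#BA55D3")):
--         span = f'<span style="background-color: {cor}44; border-bottom: 2px solid {cor}; padding: 0 2px;">{termo}</span>'
--         subs.append((termo, span))
--     partes = []
--     i = 0
--     n = len(texto)
--     while i < n:
--         for termo, span in subs:
--             if texto.startswith(termo, i):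
--                 partes.append(span)
--                 i += len(termo)
--                 break
--         else:
--             partes.append(texto[i])
--             i += 1
--     return "".join(partes)
-- ===== Notes on version B (the rewrite author's own statement) =====
-- stated objective: alternative
-- what changed: A makes five sequential full-text str.replace passes (one per keyword); B makes a single left-to-right scan over the text, substituting at each position the first keyword of the table that matches there (sound because the keywords cannot overlap each other and the inserted markup cannot recombine with its surroundings into a keyword).
import Mathlib
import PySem

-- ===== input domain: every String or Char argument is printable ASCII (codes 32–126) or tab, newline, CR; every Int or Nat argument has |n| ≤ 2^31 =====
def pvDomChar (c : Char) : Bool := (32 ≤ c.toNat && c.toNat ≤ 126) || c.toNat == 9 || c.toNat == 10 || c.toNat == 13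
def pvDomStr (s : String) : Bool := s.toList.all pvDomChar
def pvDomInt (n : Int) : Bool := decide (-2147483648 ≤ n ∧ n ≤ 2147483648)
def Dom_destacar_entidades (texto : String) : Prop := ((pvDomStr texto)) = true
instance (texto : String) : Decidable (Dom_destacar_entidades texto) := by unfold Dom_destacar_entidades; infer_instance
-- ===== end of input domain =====

-- B replaces A's five sequential full-text .replace passes by ONE left-to-right scan that
-- substitutes the first matching keyword at each position (objective: alternative).

-- ===== PORT A =====
def cores_map : PySem.Dict String String := PySem.Dict.ofList
  [("compositor", "#FFD700"), ("navio", "#1E90FF"), ("gravadora", "#BA55D3"),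
   ("escola", "#32CD32"), ("cidade", "#FF4500"), ("pais", "#20B2AA"),
   ("cantora", "#FF69B4"), ("destinatario", "#FF4B4B"), ("default", "#999999")]

-- the f-string of A, as string concatenation
def pvMkSpanStr (termo cor : String) : String :=
  "<span style=\"background-color: " ++ cor ++ "44; border-bottom: 2px solid " ++ cor
    ++ "; padding: 0 2px;\">" ++ termo ++ "</span>"

def destacar_entidades (texto : String) : String :=
  let substituicoes : List (String × String) :=
    [("Eurico", PySem.Dict.getD cores_map "destinatario" ""),
     ("Rio de Janeiro", PySem.Dict.getD cores_map "cidade" ""),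
     ("Brasil", PySem.Dict.getD cores_map "pais" ""),
     ("Marialma", PySem.Dict.getD cores_map "cantora" ""),
     ("Odeon", PySem.Dict.getD cores_map "gravadora" "")]
  substituicoes.foldl (fun texto p => PySem.Str.replace texto p.1 (pvMkSpanStr p.1 p.2)) texto

-- ===== PORT B =====
-- the same f-string, on the character-list side
def pvMkSpan (termo cor : List Char) : List Char :=
  "<span style=\"background-color: ".toList ++ cor ++ "44; border-bottom: 2px solid ".toList
    ++ cor ++ "; padding: 0 2px;\">".toList ++ termo ++ "</span>".toList

def pvSubs : List (List Char × List Char) :=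
  [("Eurico".toList, "#FF4B4B".toList), ("Rio de Janeiro".toList, "#FF4500".toList),
   ("Brasil".toList, "#20B2AA".toList), ("Marialma".toList, "#FF69B4".toList),
   ("Odeon".toList, "#BA55D3".toList)].map (fun p => (p.1, pvMkSpan p.1 p.2))

-- the inner 'for termo, span in subs: if texto.startswith(termo, i)' loop
def pvTry : List (List Char × List Char) → List Char → Option (List Char × List Char)
  | [], _ => none
  | (t, s) :: rest, l => if t.isPrefixOf l then some (t, s) else pvTry rest l

-- the outer 'while i < n' loop (fuel = number of remaining characters; each step consumes ≥ 1)
def pvScanGo (subs : List (List Char × List Char)) : Nat → List Char → List Char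
  | 0, l => l
  | fuel+1, l =>
    match pvTry subs l with
    | some (t, s) => s ++ pvScanGo subs fuel (l.drop t.length)
    | none =>
      match l with
      | [] => []
      | c :: r => c :: pvScanGo subs fuel r

def destacar_entidades_alt (texto : String) : String :=
  String.ofList (pvScanGo pvSubs texto.toList.length texto.toList)

-- ===== PRECONDITION & SPEC =====
def Spec_destacar_entidades (texto : String) (out : String) : Prop := out = destacar_entidades_alt texto
instance (texto : String) (out : String) : Decidable (Spec_destacar_entidades texto out) := by unfold Spec_destacar_entidades; infer_instance

-- ===== CLAIM (what is proved, stated in full; the proofs are below) =====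
def Claim_equal_destacar_entidades : Prop := ∀ (texto : String), Dom_destacar_entidades texto → Spec_destacar_entidades texto (destacar_entidades texto)

-- ===== LEMMAS AND PROOFS =====

def pvScan (subs : List (List Char × List Char)) (l : List Char) : List Char :=
  pvScanGo subs l.length l

def pvGood (subs : List (List Char × List Char)) : Prop := ∀ p ∈ subs, p.1 ≠ []

-- 'a' can match no window that starts strictly inside 'b' (whatever follows b)
def pvSep (a b : List Char) : Bool :=
  (List.range b.length).all (fun q => !(List.isPrefixOf a (b.drop q)) && !(List.isPrefixOf (b.drop q) a))

lemma pvTry_some {subs : List (List Char × List Char)} {l t s}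
    (h : pvTry subs l = some (t, s)) : (t, s) ∈ subs ∧ t <+: l := by
  induction subs with
  | nil => simp [pvTry] at h
  | cons p rest ih =>
    obtain ⟨tp, sp⟩ := p
    by_cases hp : tp.isPrefixOf l
    · simp [pvTry, hp] at h
      obtain ⟨h1, h2⟩ := h
      subst h1; subst h2
      exact ⟨List.mem_cons_self, List.isPrefixOf_iff_prefix.mp hp⟩
    · simp [pvTry, hp] at h
      obtain ⟨h1, h2⟩ := ih h
      exact ⟨List.mem_cons_of_mem _ h1, h2⟩

lemma pvTry_none_iff {subs : List (List Char × List Char)} {l} :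
    pvTry subs l = none ↔ ∀ p ∈ subs, ¬ p.1 <+: l := by
  induction subs with
  | nil => simp [pvTry]
  | cons p rest ih =>
    obtain ⟨tp, sp⟩ := p
    by_cases hp : tp.isPrefixOf l
    · constructor
      · intro h
        exact absurd h (by simp [pvTry, hp])
      · intro h
        exact absurd (List.isPrefixOf_iff_prefix.mp hp) (h (tp, sp) List.mem_cons_self)
    · rw [pvTry, if_neg (by simpa using hp), ih]
      constructor
      · intro h p hmem
        rcases List.mem_cons.mp hmem with hcase | hcase
        · rw [hcase]
          exact fun hc => hp (List.isPrefixOf_iff_prefix.mpr hc)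
        · exact h p hcase
      · intro h p hmem
        exact h p (List.mem_cons_of_mem _ hmem)

lemma pvTry_congr {subs : List (List Char × List Char)} {l m}
    (h : ∀ p ∈ subs, (p.1 <+: l ↔ p.1 <+: m)) : pvTry subs l = pvTry subs m := by
  induction subs with
  | nil => rfl
  | cons p rest ih =>
    obtain ⟨tp, sp⟩ := p
    have hiff := h (tp, sp) List.mem_cons_self
    by_cases hp : tp <+: l
    · have hm : tp <+: m := hiff.mp hp
      simp [pvTry, List.isPrefixOf_iff_prefix.mpr hp, List.isPrefixOf_iff_prefix.mpr hm]
    · have hm : ¬ tp <+: m := fun hc => hp (hiff.mpr hc)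
      have e1 : tp.isPrefixOf l = false :=
        Bool.eq_false_iff.mpr (fun hc => hp (List.isPrefixOf_iff_prefix.mp hc))
      have e2 : tp.isPrefixOf m = false :=
        Bool.eq_false_iff.mpr (fun hc => hm (List.isPrefixOf_iff_prefix.mp hc))
      simp [pvTry, e1, e2]
      exact ih (fun p hp => h p (List.mem_cons_of_mem _ hp))

lemma pvScanGo_nil {subs : List (List Char × List Char)} (hg : pvGood subs) (f : Nat) :
    pvScanGo subs f [] = [] := by
  cases f with
  | zero => rfl
  | succ n =>
    have : pvTry subs [] = none :=
      pvTry_none_iff.mpr (fun p hp hpre => hg p hp (List.prefix_nil.mp hpre))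
    simp [pvScanGo, this]

lemma pvScanGo_fuel {subs : List (List Char × List Char)} (hg : pvGood subs) :
    ∀ f1 f2 (l : List Char), l.length ≤ f1 → l.length ≤ f2 →
      pvScanGo subs f1 l = pvScanGo subs f2 l := by
  intro f1
  induction f1 with
  | zero =>
    intro f2 l h1 _
    have : l = [] := List.eq_nil_of_length_eq_zero (Nat.le_zero.mp h1)
    subst this
    rw [pvScanGo_nil hg, pvScanGo_nil hg]
  | succ n ih =>
    intro f2 l h1 h2
    cases l with
    | nil => rw [pvScanGo_nil hg, pvScanGo_nil hg]
    | cons c r =>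
      cases f2 with
      | zero => simp at h2
      | succ m =>
        rcases htry : pvTry subs (c :: r) with _ | ⟨t, s⟩
        · simp only [pvScanGo, htry]
          have := ih m r (by simpa using h1) (by simpa using h2)
          rw [this]
        · obtain ⟨hmem, hpre⟩ := pvTry_some htry
          have ht : t ≠ [] := hg _ hmem
          have htl : 1 ≤ t.length := by
            cases t with
            | nil => exact absurd rfl ht
            | cons _ _ => simp
          have hd : ((c :: r).drop t.length).length ≤ r.length := by
            simp only [List.length_drop, List.length_cons]
            omega
          simp only [pvScanGo, htry]
          rw [ih m _ (le_trans hd (by simpa using h1)) (le_trans hd (by simpa using h2))]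

lemma pvScan_match {subs : List (List Char × List Char)} (hg : pvGood subs) {l t s}
    (h : pvTry subs l = some (t, s)) : pvScan subs l = s ++ pvScan subs (l.drop t.length) := by
  obtain ⟨hmem, hpre⟩ := pvTry_some h
  have ht : t ≠ [] := hg _ hmem
  have htl : 1 ≤ t.length := by
    cases t with
    | nil => exact absurd rfl ht
    | cons _ _ => simp
  cases l with
  | nil =>
    exact absurd (List.prefix_nil.mp hpre) ht
  | cons c r =>
    show pvScanGo subs (c :: r).length (c :: r) = _
    simp only [List.length_cons, pvScanGo, h]
    congr 1
    exact pvScanGo_fuel hg r.length _ _ (by simp only [List.length_drop, List.length_cons]; omega) le_rfl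

lemma pvScan_nomatch {subs : List (List Char × List Char)} {c r}
    (h : pvTry subs (c :: r) = none) : pvScan subs (c :: r) = c :: pvScan subs r := by
  show pvScanGo subs (c :: r).length (c :: r) = _
  simp only [List.length_cons, pvScanGo, h]
  rfl

lemma pvSep_spec {a b : List Char} (h : pvSep a b = true) {X : List Char} {q : Nat}
    (hq : q < b.length) : ¬ a <+: (b ++ X).drop q := by
  intro hpre
  rw [List.drop_append_of_le_length (le_of_lt hq)] at hpre
  have hh := (List.all_eq_true.mp h) q (List.mem_range.mpr hq)
  simp only [Bool.and_eq_true, Bool.not_eq_true', ← Bool.not_eq_true] at hh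
  rcases List.prefix_or_prefix_of_prefix hpre (List.prefix_append _ X) with hc | hc
  · exact hh.1 (List.isPrefixOf_iff_prefix.mpr hc)
  · exact hh.2 (List.isPrefixOf_iff_prefix.mpr hc)

lemma pvSep_cons {a : List Char} {c : Char} {b : List Char} (h : pvSep a (c :: b) = true) :
    pvSep a b = true := by
  simp only [pvSep, List.all_eq_true, List.mem_range] at h ⊢
  intro q hq
  have := h (q + 1) (by simpa using hq)
  simpa using this

lemma pvScan_append {subs : List (List Char × List Char)} :
    ∀ (p X : List Char), (∀ q ∈ subs, pvSep q.1 p = true) →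
      pvScan subs (p ++ X) = p ++ pvScan subs X := by
  intro p
  induction p with
  | nil => intro X _; simp
  | cons c b ih =>
    intro X hp
    have hnone : pvTry subs ((c :: b) ++ X) = none := by
      apply pvTry_none_iff.mpr
      intro q hq hpre
      exact pvSep_spec (hp q hq) (X := X) (q := 0) (by simp) hpre
    show pvScan subs (c :: (b ++ X)) = c :: (b ++ pvScan subs X)
    have hnone' : pvTry subs (c :: (b ++ X)) = none := hnone
    rw [pvScan_nomatch hnone', ih X (fun q hq => pvSep_cons (hp q hq))]

lemma pvScan_head_keep {t s : List Char} (ht : t ≠ []) (hs : s.head? = some '<') :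
    ∀ (l u : List Char), '<' ∉ u → ¬ u <+: l → ¬ u <+: pvScan [(t, s)] l := by
  have good1 : pvGood [(t, s)] := by
    intro p hp
    simp at hp
    rw [hp]
    exact ht
  intro l
  induction l with
  | nil =>
    intro u hu hnp hcon
    exact hnp hcon
  | cons c r ih =>
    intro u hu hnp hcon
    by_cases hp : t <+: (c :: r)
    · have htry : pvTry [(t, s)] (c :: r) = some (t, s) := by
        simp [pvTry, List.isPrefixOf_iff_prefix.mpr hp]
      rw [pvScan_match good1 htry] at hcon
      cases u with
      | nil => exact hnp (List.nil_prefix)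
      | cons a u' =>
        cases s with
        | nil => simp at hs
        | cons sh st =>
          have hsh : sh = '<' := by simpa using hs
          have : a = sh ∧ u' <+: (st ++ pvScan [(t, sh :: st)] ((c :: r).drop t.length)) := by
            rw [← List.cons_prefix_cons]
            exact hcon
          apply hu
          rw [this.1, hsh]
          exact List.mem_cons_self
    · have htry : pvTry [(t, s)] (c :: r) = none := by
        apply pvTry_none_iff.mpr
        intro p hp2
        simp at hp2
        rw [hp2]
        exact hp
      rw [pvScan_nomatch htry] at hcon
      cases u with
      | nil => exact hnp (List.nil_prefix)
      | cons a u' =>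
        obtain ⟨hac, hu'⟩ := List.cons_prefix_cons.mp hcon
        subst hac
        have hnp' : ¬ u' <+: r := by
          intro hc
          exact hnp (List.cons_prefix_cons.mpr ⟨rfl, hc⟩)
        exact ih u' (fun hm => hu (List.mem_cons_of_mem _ hm)) hnp' hu'

-- one sequential pass 'replace t by s' followed by the multi-keyword scan over 'subs'
-- equals the multi-keyword scan with (t, s) put in front of the table
lemma pvScan_push {t s : List Char} {subs : List (List Char × List Char)}
    (ht : t ≠ []) (hs : s.head? = some '<')
    (h3 : pvGood subs) (h4 : ∀ p ∈ subs, '<' ∉ p.1)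
    (h5 : ∀ p ∈ subs, pvSep t p.1 = true)
    (h6 : ∀ p ∈ subs, pvSep p.1 s = true) :
    ∀ l : List Char, pvScan subs (pvScan [(t, s)] l) = pvScan ((t, s) :: subs) l := by
  have good1 : pvGood [(t, s)] := by
    intro p hp
    simp at hp
    rw [hp]
    exact ht
  have goodC : pvGood ((t, s) :: subs) := by
    intro p hp
    rcases List.mem_cons.mp hp with h | h
    · rw [h]; exact ht
    · exact h3 p h
  have htl : 1 ≤ t.length := by
    cases t with
    | nil => exact absurd rfl ht
    | cons _ _ => simp
  suffices h : ∀ n (l : List Char), l.length ≤ n →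
      pvScan subs (pvScan [(t, s)] l) = pvScan ((t, s) :: subs) l by
    intro l; exact h l.length l le_rfl
  intro n
  induction n with
  | zero =>
    intro l hl
    have : l = [] := List.eq_nil_of_length_eq_zero (Nat.le_zero.mp hl)
    subst this
    rfl
  | succ n ih =>
    intro l hl
    by_cases hp1 : t <+: l
    · -- the front keyword matches at the head
      have hlne : l ≠ [] := by
        intro hc; subst hc; exact ht (List.prefix_nil.mp hp1)
      have htry1 : pvTry [(t, s)] l = some (t, s) := by
        simp [pvTry, List.isPrefixOf_iff_prefix.mpr hp1]
      have htryC : pvTry ((t, s) :: subs) l = some (t, s) := by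
        simp [pvTry, List.isPrefixOf_iff_prefix.mpr hp1]
      rw [pvScan_match good1 htry1, pvScan_append s _ h6,
          pvScan_match goodC htryC]
      congr 1
      apply ih
      have : 1 ≤ l.length := by
        cases l with
        | nil => exact absurd rfl hlne
        | cons _ _ => simp
      simp only [List.length_drop]
      omega
    · rcases htry2 : pvTry subs l with _ | ⟨tj, sj⟩
      · -- no keyword at all matches at the head
        have htryC : pvTry ((t, s) :: subs) l = none := by
          have e1 : t.isPrefixOf l = false :=
            Bool.eq_false_iff.mpr (fun hc => hp1 (List.isPrefixOf_iff_prefix.mp hc))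
          simp [pvTry, e1, htry2]
        cases l with
        | nil => rfl
        | cons c r =>
          have htry1 : pvTry [(t, s)] (c :: r) = none := by
            apply pvTry_none_iff.mpr
            intro p hp2
            simp at hp2
            rw [hp2]
            exact hp1
          have hrep : pvScan [(t, s)] (c :: r) = c :: pvScan [(t, s)] r :=
            pvScan_nomatch htry1
          have hnone2 : pvTry subs (c :: pvScan [(t, s)] r) = none := by
            apply pvTry_none_iff.mpr
            intro p hp2 hcon
            have hnl : ¬ p.1 <+: (c :: r) := pvTry_none_iff.mp htry2 p hp2
            have := pvScan_head_keep ht hs (c :: r) p.1 (h4 p hp2) hnl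
            rw [hrep] at this
            exact this hcon
          rw [hrep, pvScan_nomatch hnone2, pvScan_nomatch htryC]
          congr 1
          exact ih r (by simpa using hl)
      · -- a later keyword matches at the head
        obtain ⟨hmem, hprej⟩ := pvTry_some htry2
        have htj : tj ≠ [] := h3 _ hmem
        have htjl : 1 ≤ tj.length := by
          cases tj with
          | nil => exact absurd rfl htj
          | cons _ _ => simp
        obtain ⟨X, rfl⟩ := hprej
        have hXlen : X.length ≤ n := by
          rw [List.length_append] at hl
          omega
        have hrep : pvScan [(t, s)] (tj ++ X) = tj ++ pvScan [(t, s)] X := by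
          apply pvScan_append
          intro q hq
          simp at hq
          rw [hq]
          exact h5 _ hmem
        have htrym : pvTry subs (tj ++ pvScan [(t, s)] X) = some (tj, sj) := by
          rw [← htry2]
          apply Eq.symm
          apply pvTry_congr
          intro p hp2
          constructor
          · intro hpl
            obtain ⟨Y, hY⟩ := hpl
            have : pvScan [(t, s)] (tj ++ X) = p.1 ++ pvScan [(t, s)] Y := by
              rw [← hY]
              apply pvScan_append
              intro q hq
              simp at hq
              rw [hq]
              exact h5 _ hp2
            rw [hrep] at this
            exact ⟨_, this.symm⟩
          · intro hpm
            by_contra hnl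
            have := pvScan_head_keep ht hs (tj ++ X) p.1 (h4 p hp2) hnl
            rw [hrep] at this
            exact this hpm
        have htryC : pvTry ((t, s) :: subs) (tj ++ X) = some (tj, sj) := by
          have e1 : t.isPrefixOf (tj ++ X) = false :=
            Bool.eq_false_iff.mpr (fun hc => hp1 (List.isPrefixOf_iff_prefix.mp hc))
          simp [pvTry, e1, htry2]
        rw [hrep, pvScan_match h3 htrym, pvScan_match goodC htryC, List.drop_left,
            List.drop_left, ih X hXlen]

-- bridge: PySem's replace-with-accumulator IS the one-keyword scan
lemma pvGo_eq {old new : List Char} (h : old ≠ []) :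
    ∀ (fuel : Nat) (l acc : List Char),
      PySem.Chars.replace.go old new fuel l acc = acc.reverse ++ pvScanGo [(old, new)] fuel l := by
  obtain ⟨o, ot, rfl⟩ : ∃ o ot, old = o :: ot := by
    cases old with
    | nil => exact absurd rfl h
    | cons o ot => exact ⟨o, ot, rfl⟩
  intro fuel
  induction fuel with
  | zero => intro l acc; rfl
  | succ n ih =>
    intro l acc
    cases l with
    | nil => simp [PySem.Chars.replace.go, pvScanGo, pvTry]
    | cons c r =>
      by_cases hp : (o :: ot).isPrefixOf (c :: r)
      · simp only [PySem.Chars.replace.go, hp, if_true, ih, pvScanGo, pvTry, List.reverse_append,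
          List.reverse_reverse, List.append_assoc]
      · simp only [PySem.Chars.replace.go, hp, if_false, ih, pvScanGo, pvTry, List.reverse_cons,
          List.append_assoc, List.singleton_append, Bool.false_eq_true]

lemma pvReplace_eq {old new : List Char} (h : old ≠ []) (sL : List Char) :
    PySem.Chars.replace sL old new = pvScan [(old, new)] sL := by
  have he : old.isEmpty = false := by
    cases old with
    | nil => exact absurd rfl h
    | cons _ _ => rfl
  rw [PySem.Chars.replace, he]
  simp only [Bool.false_eq_true, if_false]
  rw [pvGo_eq h sL.length sL []]
  rfl

lemma pvSpanStr_toList (termo cor : String) :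
    (pvMkSpanStr termo cor).toList = pvMkSpan termo.toList cor.toList := by
  simp [pvMkSpanStr, pvMkSpan, String.toList_append]

-- the five keywords and spans, as B's table holds them
lemma pvSubs_eq : pvSubs =
    [("Eurico".toList, pvMkSpan "Eurico".toList "#FF4B4B".toList),
     ("Rio de Janeiro".toList, pvMkSpan "Rio de Janeiro".toList "#FF4500".toList),
     ("Brasil".toList, pvMkSpan "Brasil".toList "#20B2AA".toList),
     ("Marialma".toList, pvMkSpan "Marialma".toList "#FF69B4".toList),
     ("Odeon".toList, pvMkSpan "Odeon".toList "#BA55D3".toList)] := by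
  rfl

-- chain the five sequential passes into the five-keyword scan
set_option maxRecDepth 100000 in
lemma pvChain (L : List Char) :
    PySem.Chars.replace (PySem.Chars.replace (PySem.Chars.replace (PySem.Chars.replace
      (PySem.Chars.replace L "Eurico".toList (pvMkSpan "Eurico".toList "#FF4B4B".toList))
      "Rio de Janeiro".toList (pvMkSpan "Rio de Janeiro".toList "#FF4500".toList))
      "Brasil".toList (pvMkSpan "Brasil".toList "#20B2AA".toList))
      "Marialma".toList (pvMkSpan "Marialma".toList "#FF69B4".toList))
      "Odeon".toList (pvMkSpan "Odeon".toList "#BA55D3".toList)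
    = pvScan pvSubs L := by
  rw [pvReplace_eq (by decide), pvReplace_eq (by decide), pvReplace_eq (by decide),
      pvReplace_eq (by decide), pvReplace_eq (by decide)]
  rw [pvScan_push (by decide) (by decide) (by unfold pvGood; decide) (by decide) (by decide) (by decide)]
  rw [pvScan_push (by decide) (by decide) (by unfold pvGood; decide) (by decide) (by decide) (by decide)]
  rw [pvScan_push (by decide) (by decide) (by unfold pvGood; decide) (by decide) (by decide) (by decide)]
  rw [pvScan_push (by decide) (by decide) (by unfold pvGood; decide) (by decide) (by decide) (by decide)]
  rw [pvSubs_eq]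

-- ===== VERDICT (by name: the statement is the Claim_ definition above) =====
theorem destacar_entidades_spec : Claim_equal_destacar_entidades := by
  intro texto _
  show destacar_entidades texto = destacar_entidades_alt texto
  apply String.toList_inj.mp
  have hd1 : PySem.Dict.getD cores_map "destinatario" "" = "#FF4B4B" := by decide
  have hd2 : PySem.Dict.getD cores_map "cidade" "" = "#FF4500" := by decide
  have hd3 : PySem.Dict.getD cores_map "pais" "" = "#20B2AA" := by decide
  have hd4 : PySem.Dict.getD cores_map "cantora" "" = "#FF69B4" := by decide
  have hd5 : PySem.Dict.getD cores_map "gravadora" "" = "#BA55D3" := by decide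
  simp only [destacar_entidades, destacar_entidades_alt, List.foldl, hd1, hd2, hd3, hd4, hd5,
    PySem.Str.toList_replace, String.toList_ofList, pvSpanStr_toList]
  exact pvChain texto.toList
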